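-- pv_equiv track=rewrite | github.com/interact-erc/TPol | bert_reorderer.py | preprocess_MR
-- ===== SOURCE A (Python) =====
-- def preprocess_MR(sentence):
--     sequence = sentence.replace('(', ' ( ').replace(')', ' ) ').split()
--     s = []
--     stop_at_j = -1
--
--     for j in range(len(sequence)):
--         if stop_at_j > 0:
--             stop_at_j = stop_at_j -1
--         elif sequence[j] in ('(', ')'):
--             continue
--         elif sequence[j] in ('stateid', 'riverid', 'cityid', 'countryid', 'placeid'):
--             i = j
--             while sequence[i] != ')':
--                 i += 1
--             x = ' '.join(sequence[j:i+1])
--             x = x.replace(' ( ', '(').replace(' )', ')')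
--             s.append(x)
--             stop_at_j = i-j
--         elif sequence[j] == 'all':
--             s[-1] = s[-1] + '(all)'
--         else:
--             s.append(sequence[j])
--
--     s =[j for j in s if j != ',']
--
--     return s
-- ===== SOURCE B (Python) =====
-- def preprocess_MR(sentence):
--     tokens = sentence.replace('(', ' ( ').replace(')', ' ) ').split()
--     # stage 1: collapse each keyword span into one reformatted chunk, dropping parentheses
--     chunks = []
--     it = iter(tokens)
--     for tok in it:
--         if tok in ('(', ')'):
--             continue
--         if tok in ('stateid', 'riverid', 'cityid', 'countryid', 'placeid'):
--             span = [tok]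
--             for u in it:
--                 span.append(u)
--                 if u == ')':
--                     break
--             chunks.append(' '.join(span).replace(' ( ', '(').replace(' )', ')'))
--         else:
--             chunks.append(tok)
--     # stage 2: fold each 'all' marker into the item before it
--     merged = []
--     for tok in chunks:
--         if tok == 'all':
--             merged[-1] += '(all)'
--         else:
--             merged.append(tok)
--     # stage 3: drop comma tokens
--     return [tok for tok in merged if tok != ',']
-- ===== Notes on version B (the rewrite author's own statement) =====
-- stated objective: alternative
-- what changed: Replaced A's single stateful for-loop (index countdown stop_at_j, in-loop 'all' patching and trailing comma filter) by a three-stage pipeline: an iterator pass that collapses each keyword span into one chunk by consuming the shared iterator up to ')', then a separate fold merging 'all' markers into the previous item, then the comma filter.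
import Mathlib
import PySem

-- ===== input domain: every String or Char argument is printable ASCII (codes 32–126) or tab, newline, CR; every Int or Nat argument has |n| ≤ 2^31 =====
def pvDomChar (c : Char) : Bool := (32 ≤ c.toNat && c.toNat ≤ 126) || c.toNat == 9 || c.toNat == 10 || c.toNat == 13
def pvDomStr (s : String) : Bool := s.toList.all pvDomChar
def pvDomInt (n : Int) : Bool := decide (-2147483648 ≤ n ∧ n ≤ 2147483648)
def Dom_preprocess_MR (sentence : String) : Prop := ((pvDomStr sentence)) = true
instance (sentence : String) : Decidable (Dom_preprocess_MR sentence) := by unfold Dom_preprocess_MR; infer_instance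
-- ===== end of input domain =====

-- B replaces A's single stateful loop (stop_at_j countdown, in-loop 'all' patching) by a three-stage
-- pipeline: collapse keyword spans into chunks, then merge 'all' markers, then filter commas.
-- Objective: alternative decomposition, same cost; return values proved equal on Pre_.

-- shared first line of both Pythons: sentence.replace('(', ' ( ').replace(')', ' ) ').split()
def pvTokens (sentence : String) : List String :=
  PySem.Str.split₀ (PySem.Str.replace (PySem.Str.replace sentence "(" " ( ") ")" " ) ")

-- A's inner `while sequence[i] != ')': i += 1` as an offset from the start position;
-- when no ')' follows, Python A raises IndexError (excluded by Pre_) and this returns the remainder's length.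
def pvScanClose : List String → Nat
  | [] => 0
  | t :: r => if t = ")" then 0 else pvScanClose r + 1

-- shared reformatting: ' '.join(span).replace(' ( ', '(').replace(' )', ')')
def pvFmt (span : List String) : String :=
  PySem.Str.replace (PySem.Str.replace (PySem.Str.join " " span) " ( " "(") " )" ")"

-- ===== PORT A =====
-- one iteration of A's `for j in range(len(sequence))` loop; state = (s, stop_at_j)
def pvStepA (seq : List String) (st : List String × Int) (j : Int) : List String × Int :=
  if st.2 > 0 then (st.1, st.2 - 1)
  else
    let t := PySem.List.pyGetD seq j ""
    if t = "(" ∨ t = ")" then st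
    else if t = "stateid" ∨ t = "riverid" ∨ t = "cityid" ∨ t = "countryid" ∨ t = "placeid" then
      let i : Int := j + (pvScanClose (seq.drop j.toNat) : Int)
      let x := pvFmt (PySem.List.slice seq (some j) (some (i + 1)))
      (st.1 ++ [x], i - j)
    else if t = "all" then
      -- Python `s[-1] = s[-1] + '(all)'`; on empty s Python raises IndexError (excluded by Pre_)
      (match st.1.getLast? with
       | some l => st.1.dropLast ++ [l ++ "(all)"]
       | none => st.1, st.2)
    else (st.1 ++ [t], st.2)

def preprocess_MR (sentence : String) : List String :=
  let seq := pvTokens sentence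
  let res := (PySem.List.pyRange 0 (PySem.List.len seq) 1).foldl (pvStepA seq) ([], -1)
  res.1.filter (fun t => t != ",")

-- ===== PORT B =====
-- B's stage 1: the two nested `for … in it` loops sharing one iterator, rendered as one structural
-- pass over the token list whose optional state `some span` is the span the inner loop is collecting
-- (`span.append(u)`, leaving the inner loop on `u == ')'`; iterator exhaustion ends either loop)
def pvStage1 : List String → Option (List String) → List String
  | [], none => []
  | [], some sp => [pvFmt sp]
  | t :: r, none =>
    if t = "(" ∨ t = ")" then pvStage1 r none
    else if t = "stateid" ∨ t = "riverid" ∨ t = "cityid" ∨ t = "countryid" ∨ t = "placeid" then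
      pvStage1 r (some [t])
    else t :: pvStage1 r none
  | u :: r, some sp =>
    if u = ")" then pvFmt (sp ++ [u]) :: pvStage1 r none
    else pvStage1 r (some (sp ++ [u]))

-- B's stage 2: one iteration of the `for tok in chunks` loop building `merged`
def pvMergeStep (s : List String) (t : String) : List String :=
  if t = "all" then
    -- Python `merged[-1] += '(all)'`; on empty merged Python raises IndexError (excluded by Pre_)
    (match s.getLast? with
     | some l => s.dropLast ++ [l ++ "(all)"]
     | none => s)
  else s ++ [t]

def preprocess_MR_alt (sentence : String) : List String :=
  ((pvStage1 (pvTokens sentence) none).foldl pvMergeStep []).filter (fun t => t != ",")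

-- ===== PRECONDITION & SPEC =====
-- Pre_ excludes exactly the inputs where Python A raises IndexError:
-- a keyword token with no ')' anywhere after it, or the first non-parenthesis token being 'all'.
def Pre_preprocess_MR (sentence : String) : Prop :=
  (∀ j : Nat, j < (pvTokens sentence).length →
      ((pvTokens sentence).getD j "" = "stateid" ∨ (pvTokens sentence).getD j "" = "riverid" ∨
       (pvTokens sentence).getD j "" = "cityid" ∨ (pvTokens sentence).getD j "" = "countryid" ∨
       (pvTokens sentence).getD j "" = "placeid") → ")" ∈ (pvTokens sentence).drop j) ∧
  ((pvTokens sentence).filter (fun t => decide (t ≠ "(" ∧ t ≠ ")"))).head? ≠ some "all"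
instance (sentence : String) : Decidable (Pre_preprocess_MR sentence) := by
  unfold Pre_preprocess_MR; infer_instance

def pvWitness_preprocess_MR : String := "answer(cityid(austin,tx))"

def Spec_preprocess_MR (sentence : String) (out : List String) : Prop := out = preprocess_MR_alt sentence
instance (sentence : String) (out : List String) : Decidable (Spec_preprocess_MR sentence out) := by
  unfold Spec_preprocess_MR; infer_instance

-- ===== CLAIM (what is proved, stated in full; the proofs are below) =====
def Claim_equal_preprocess_MR : Prop := ∀ (sentence : String), Dom_preprocess_MR sentence → Pre_preprocess_MR sentence → Spec_preprocess_MR sentence (preprocess_MR sentence)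
-- ===== LEMMAS AND PROOFS =====

-- the inner loop's effect in isolation: the tokens it consumes (up to and including the first ')',
-- or all of them if none) and the leftover tokens
def pvSpan : List String → List String × List String
  | [] => ([], [])
  | u :: r => if u = ")" then ([u], r) else
      let p := pvSpan r
      (u :: p.1, p.2)

-- collecting state `some sp` emits one formatted chunk built from sp and the span, then resumes
lemma pvStage1_some : ∀ (r : List String) (sp : List String),
    pvStage1 r (some sp) = pvFmt (sp ++ (pvSpan r).1) :: pvStage1 (pvSpan r).2 none := by
  intro r
  induction r with
  | nil => intro sp; simp [pvStage1, pvSpan]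
  | cons u r ih =>
    intro sp
    by_cases h : u = ")"
    · simp [pvStage1, pvSpan, h]
    · simp [pvStage1, pvSpan, h, ih]

-- B's iterator span = take/drop at the first ')' (all of it if none)
lemma pvSpan_eq : ∀ (r : List String),
    pvSpan r = (r.take (pvScanClose r + 1), r.drop (pvScanClose r + 1)) := by
  intro r
  induction r with
  | nil => simp [pvSpan, pvScanClose]
  | cons u r ih =>
    by_cases h : u = ")" <;> simp [pvSpan, pvScanClose, h, ih]

-- proof-only middleman: an index-jumping loop equal to A's fold (pvMain) and to B's pipeline (pvBridge)
def pvLoopB (seq : List String) (s : List String) (i : Nat) : List String :=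
  if h : i < seq.length then
    let t := PySem.List.pyGetD seq (i : Int) ""
    if t = "(" ∨ t = ")" then pvLoopB seq s (i + 1)
    else if t = "stateid" ∨ t = "riverid" ∨ t = "cityid" ∨ t = "countryid" ∨ t = "placeid" then
      let k : Nat := i + pvScanClose (seq.drop i)
      let x := pvFmt (PySem.List.slice seq (some (i : Int)) (some ((k : Int) + 1)))
      pvLoopB seq (s ++ [x]) (k + 1)
    else if t = "all" then
      pvLoopB seq
        (match s.getLast? with
         | some l => s.dropLast ++ [l ++ "(all)"]
         | none => s) (i + 1)
    else pvLoopB seq (s ++ [t]) (i + 1)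
  else s
termination_by seq.length - i
decreasing_by all_goals omega

-- while stop_at_j > 0, A only decrements: it skips the next c indices of the range
lemma pvSkip (seq : List String) (m : Int) (c : Nat) : ∀ (a : Int) (s : List String),
    ((PySem.List.pyRange a m 1).foldl (pvStepA seq) (s, (c : Int))).1
      = ((PySem.List.pyRange (a + c) m 1).foldl (pvStepA seq) (s, 0)).1 := by
  induction c with
  | zero => intro a s; norm_num
  | succ c ih =>
    intro a s
    by_cases h : a < m
    · rw [PySem.List.pyRange_one_cons h, List.foldl_cons]
      have hstep : pvStepA seq (s, ((c + 1 : Nat) : Int)) a = (s, (c : Int)) := by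
        simp [pvStepA]
      rw [hstep, ih]
      have harith : a + 1 + (c : Int) = a + ((c + 1 : Nat) : Int) := by push_cast; ring
      rw [harith]
    · rw [PySem.List.pyRange_one_eq_nil (by omega), PySem.List.pyRange_one_eq_nil (by omega)]
      rfl

-- main invariant: with stop_at_j ≤ 0, A's remaining fold from index i equals the middleman from index i
lemma pvMain (seq : List String) : ∀ (fuel : Nat) (i : Nat) (s : List String) (c : Int),
    seq.length - i ≤ fuel → c ≤ 0 →
    ((PySem.List.pyRange (i : Int) (seq.length : Int) 1).foldl (pvStepA seq) (s, c)).1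
      = pvLoopB seq s i := by
  intro fuel
  induction fuel with
  | zero =>
    intro i s c hf hc
    have hge : seq.length ≤ i := by omega
    rw [PySem.List.pyRange_one_eq_nil (by exact_mod_cast hge), pvLoopB]
    simp [Nat.not_lt.mpr hge]
  | succ fuel ih =>
    intro i s c hf hc
    by_cases hi : i < seq.length
    · rw [PySem.List.pyRange_one_cons (by exact_mod_cast hi), List.foldl_cons, pvLoopB,
        dif_pos hi]
      have hnot : ¬ (c > 0) := by omega
      simp only [pvStepA, PySem.List.pyGetD_natCast, Int.toNat_natCast, if_neg hnot]
      by_cases hp : seq.getD i "" = "(" ∨ seq.getD i "" = ")"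
      · simp only [if_pos hp]
        have := ih (i + 1) s c (by omega) hc
        simpa using this
      · simp only [if_neg hp]
        by_cases hk : seq.getD i "" = "stateid" ∨ seq.getD i "" = "riverid" ∨ seq.getD i "" = "cityid" ∨ seq.getD i "" = "countryid" ∨ seq.getD i "" = "placeid"
        · simp only [if_pos hk, add_sub_cancel_left]
          rw [pvSkip]
          have harith : (i : Int) + 1 + (pvScanClose (seq.drop i) : Int)
              = ((i + pvScanClose (seq.drop i) + 1 : Nat) : Int) := by push_cast; ring
          rw [harith]
          have := ih (i + pvScanClose (seq.drop i) + 1)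
              (s ++ [pvFmt (PySem.List.slice seq (some (i : Int))
                  (some ((i : Int) + (pvScanClose (seq.drop i) : Int) + 1)))])
              0 (by omega) (by omega)
          simpa using this
        · simp only [if_neg hk]
          by_cases ha : seq.getD i "" = "all"
          · simp only [if_pos ha]
            have := ih (i + 1) (match s.getLast? with
                | some l => s.dropLast ++ [l ++ "(all)"]
                | none => s) c (by omega) hc
            simpa using this
          · simp only [if_neg ha]
            have := ih (i + 1) (s ++ [seq.getD i ""]) c (by omega) hc
            simpa using this
    · rw [PySem.List.pyRange_one_eq_nil (by exact_mod_cast (by omega : (seq.length : Nat) ≤ i)), pvLoopB]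
      simp [hi]

-- PySem.Chars.replace.go prepends acc.reverse to whatever it produces
lemma pvReplaceGoShape (old new : List Char) : ∀ (fuel : Nat) (l acc : List Char),
    ∃ r, PySem.Chars.replace.go old new fuel l acc = acc.reverse ++ r := by
  intro fuel
  induction fuel with
  | zero => intro l acc; exact ⟨l, rfl⟩
  | succ fuel ih =>
    intro l acc
    cases l with
    | nil => exact ⟨[], by simp [PySem.Chars.replace.go]⟩
    | cons c t =>
      rw [PySem.Chars.replace.go]
      by_cases h : old.isPrefixOf (c :: t) = true
      · rw [if_pos h]
        obtain ⟨r, hr⟩ := ih (List.drop old.length (c :: t)) (new.reverse ++ acc)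
        exact ⟨new ++ r, by simp [hr]⟩
      · rw [if_neg h]
        obtain ⟨r, hr⟩ := ih t (c :: acc)
        exact ⟨c :: r, by simp [hr]⟩

-- replace keeps the first character when the pattern cannot start there
lemma pvReplaceHead (old new : List Char) (c : Char) (t : List Char)
    (hold : old ≠ []) (hne : old.head? ≠ some c) :
    ∃ r, PySem.Chars.replace (c :: t) old new = c :: r := by
  cases old with
  | nil => exact absurd rfl hold
  | cons o os =>
    have hpre : (o :: os).isPrefixOf (c :: t) = false := by
      simp only [List.isPrefixOf_cons₂]
      have : o ≠ c := by intro h; apply hne; simp [h]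
      simp [beq_eq_false_iff_ne.mpr this]
    rw [PySem.Chars.replace]
    rw [if_neg (by simp), show (c :: t).length = t.length + 1 from by simp,
      PySem.Chars.replace.go, hpre]
    simp only [Bool.false_eq_true, if_false]
    obtain ⟨r, hr⟩ := pvReplaceGoShape (o :: os) new t.length t [c]
    exact ⟨r, by simpa using hr⟩

-- a chunk formatted from a keyword span starts with the keyword's first letter
lemma pvFmtHead (t : String) (r : List String) (c : Char) (cs : List Char)
    (h : t.toList = c :: cs) (h1 : c ≠ ' ') :
    ∃ rest, (pvFmt (t :: r)).toList = c :: rest := by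
  have hjoin : ∃ q, (PySem.Str.join " " (t :: r)).toList = c :: q := by
    cases r with
    | nil =>
      exact ⟨cs, by simp [PySem.Str.join, PySem.Chars.join, List.intercalate, h]⟩
    | cons b rs =>
      refine ⟨cs ++ ' ' :: [' '].intercalate (b.toList :: rs.map String.toList), ?_⟩
      simp [PySem.Str.join, PySem.Chars.join, List.intercalate, h]
  obtain ⟨q, hq⟩ := hjoin
  have h2 : (" ( " : String).toList.head? ≠ some c := by
    intro hx; simp at hx; exact h1 hx.symm
  have h3 : (" )" : String).toList.head? ≠ some c := by
    intro hx; simp at hx; exact h1 hx.symm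
  unfold pvFmt
  obtain ⟨r1, hr1⟩ := pvReplaceHead (" ( " : String).toList ("(" : String).toList c q (by decide) h2
  obtain ⟨r2, hr2⟩ := pvReplaceHead (" )" : String).toList (")" : String).toList c r1 (by decide) h3
  refine ⟨r2, ?_⟩
  rw [PySem.Str.toList_replace, PySem.Str.toList_replace, hq, hr1, hr2]

lemma pvFmt_ne_all (t : String) (r : List String)
    (hk : t = "stateid" ∨ t = "riverid" ∨ t = "cityid" ∨ t = "countryid" ∨ t = "placeid") :
    pvFmt (t :: r) ≠ "all" := by
  have : ∃ c cs, t.toList = c :: cs ∧ c ≠ 'a' ∧ c ≠ ' ' := by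
    rcases hk with h | h | h | h | h <;> subst h
    · exact ⟨'s', "tateid".toList, by decide, by decide, by decide⟩
    · exact ⟨'r', "iverid".toList, by decide, by decide, by decide⟩
    · exact ⟨'c', "ityid".toList, by decide, by decide, by decide⟩
    · exact ⟨'c', "ountryid".toList, by decide, by decide, by decide⟩
    · exact ⟨'p', "laceid".toList, by decide, by decide, by decide⟩
  obtain ⟨c, cs, hcs, hca, hcsp⟩ := this
  obtain ⟨rest, hrest⟩ := pvFmtHead t r c cs hcs hcsp
  intro h
  rw [h] at hrest
  simp only [show ("all" : String).toList = ['a', 'l', 'l'] from rfl] at hrest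
  exact hca (by injection hrest with h1 _; exact h1.symm)

-- the middleman equals B's pipeline: folding the merge step over stage 1 of the remaining suffix
lemma pvBridge (seq : List String) : ∀ (fuel : Nat) (i : Nat) (s : List String),
    seq.length - i ≤ fuel →
    pvLoopB seq s i = (pvStage1 (seq.drop i) none).foldl pvMergeStep s := by
  intro fuel
  induction fuel with
  | zero =>
    intro i s hf
    have hge : seq.length ≤ i := by omega
    rw [pvLoopB, List.drop_eq_nil_of_le hge]
    simp [Nat.not_lt.mpr hge, pvStage1]
  | succ fuel ih =>
    intro i s hf
    by_cases hi : i < seq.length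
    · have hdrop : seq.drop i = seq.getD i "" :: seq.drop (i + 1) := by
        rw [List.drop_eq_getElem_cons hi, List.getD_eq_getElem seq "" hi]
      rw [pvLoopB, dif_pos hi]
      simp only [PySem.List.pyGetD_natCast]
      by_cases hp : seq.getD i "" = "(" ∨ seq.getD i "" = ")"
      · simp only [if_pos hp]
        have hstage : pvStage1 (seq.drop i) none = pvStage1 (seq.drop (i + 1)) none := by
          rw [hdrop]; simp only [pvStage1]; rw [if_pos hp]
        rw [hstage, ih (i + 1) s (by omega)]
      · simp only [if_neg hp]
        by_cases hk : seq.getD i "" = "stateid" ∨ seq.getD i "" = "riverid" ∨ seq.getD i "" = "cityid" ∨ seq.getD i "" = "countryid" ∨ seq.getD i "" = "placeid"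
        · simp only [if_pos hk]
          have hnr : seq.getD i "" ≠ ")" := fun h => hp (Or.inr h)
          have hscan : pvScanClose (seq.drop i) = pvScanClose (seq.drop (i + 1)) + 1 := by
            rw [hdrop, pvScanClose, if_neg hnr]
          have hstage : pvStage1 (seq.drop i) none
              = pvFmt (seq.getD i "" :: (seq.drop (i + 1)).take (pvScanClose (seq.drop (i + 1)) + 1))
                :: pvStage1 ((seq.drop (i + 1)).drop (pvScanClose (seq.drop (i + 1)) + 1)) none := by
            rw [hdrop]; simp only [pvStage1]
            rw [if_neg hp, if_pos hk, pvStage1_some, pvSpan_eq]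
            simp
          have hslice : PySem.List.slice seq (some (i : Int))
              (some (((i + pvScanClose (seq.drop i) : Nat) : Int) + 1))
              = seq.getD i "" :: (seq.drop (i + 1)).take (pvScanClose (seq.drop (i + 1)) + 1) := by
            have harith : (((i + pvScanClose (seq.drop i) : Nat) : Int) + 1)
                = (i : Int) + ((pvScanClose (seq.drop i) + 1 : Nat) : Int) := by push_cast; ring
            rw [harith, PySem.List.slice_natCast_add, hscan, hdrop, List.take_succ_cons]
          have hmerge : pvMergeStep s
              (pvFmt (seq.getD i "" :: (seq.drop (i + 1)).take (pvScanClose (seq.drop (i + 1)) + 1)))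
              = s ++ [pvFmt (seq.getD i "" :: (seq.drop (i + 1)).take (pvScanClose (seq.drop (i + 1)) + 1))] := by
            rw [pvMergeStep, if_neg (pvFmt_ne_all _ _ hk)]
          rw [hstage, List.foldl_cons, hmerge, List.drop_drop, hslice]
          have hidx : i + 1 + (pvScanClose (seq.drop (i + 1)) + 1) = i + pvScanClose (seq.drop i) + 1 := by
            rw [hscan]; ring
          rw [hidx]
          exact ih (i + pvScanClose (seq.drop i) + 1) _ (by omega)
        · simp only [if_neg hk]
          have hstage : pvStage1 (seq.drop i) none
              = seq.getD i "" :: pvStage1 (seq.drop (i + 1)) none := by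
            rw [hdrop]; simp only [pvStage1]; rw [if_neg hp, if_neg hk]
          rw [hstage, List.foldl_cons]
          by_cases ha : seq.getD i "" = "all"
          · simp only [if_pos ha]
            rw [show pvMergeStep s (seq.getD i "") = (match s.getLast? with
                | some l => s.dropLast ++ [l ++ "(all)"]
                | none => s) from by rw [pvMergeStep, if_pos ha]]
            exact ih (i + 1) _ (by omega)
          · simp only [if_neg ha]
            rw [show pvMergeStep s (seq.getD i "") = s ++ [seq.getD i ""] from by
              rw [pvMergeStep, if_neg ha]]
            exact ih (i + 1) _ (by omega)
    · rw [pvLoopB, dif_neg hi, List.drop_eq_nil_of_le (by omega)]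
      simp [pvStage1]

-- ===== VERDICT (by name: the statement is the Claim_ definition above) =====
theorem preprocess_MR_spec : Claim_equal_preprocess_MR := by
  intro sentence _ _
  unfold Spec_preprocess_MR preprocess_MR preprocess_MR_alt
  simp only [PySem.List.len_eq]
  have h := pvMain (pvTokens sentence) (pvTokens sentence).length 0 [] (-1) (by omega) (by omega)
  simp only [Nat.cast_zero] at h
  rw [h, pvBridge (pvTokens sentence) (pvTokens sentence).length 0 [] (by omega)]
  simp
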